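-- pv_equiv track=rewrite | github.com/jjiah/wireless-research-intel | pdf_to_markdown.py | dedupe_boundary_overlap
-- ===== SOURCE A (Python) =====
-- def normalize_newlines(text: str) -> str:
--     return text.replace("\r\n", "\n").replace("\r", "\n")
--
-- def dedupe_boundary_overlap(left: str, right: str, max_lines: int = 20) -> tuple[str, str]:
--     left_lines = normalize_newlines(left).split("\n")
--     right_lines = normalize_newlines(right).split("\n")
--     limit = min(max_lines, len(left_lines), len(right_lines))
--     overlap = 0
--     for size in range(limit, 0, -1):
--         if left_lines[-size:] == right_lines[:size]:
--             overlap = size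
--             break
--     if overlap > 0:
--         right_lines = right_lines[overlap:]
--     return "\n".join(left_lines), "\n".join(right_lines)
-- ===== SOURCE B (Python) =====
-- def normalize_newlines(text: str) -> str:
--     return text.replace("\r\n", "\n").replace("\r", "\n")
--
--
-- def _advance(p, pi, k, line):
--     # KMP automaton step: longest prefix of p that is a suffix of the text seen so far.
--     while k > 0 and (k == len(p) or line != p[k]):
--         k = pi[k - 1]
--     if k < len(p) and line == p[k]:
--         k += 1
--     return k
--
--
-- def _prefix_function(p):
--     pi = [0] * len(p)
--     k = 0
--     for i in range(1, len(p)):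
--         k = _advance(p, pi, k, p[i])
--         pi[i] = k
--     return pi
--
--
-- def dedupe_boundary_overlap(left: str, right: str, max_lines: int = 20) -> tuple[str, str]:
--     left_lines = normalize_newlines(left).split("\n")
--     right_lines = normalize_newlines(right).split("\n")
--     limit = min(max_lines, len(left_lines), len(right_lines))
--     p = right_lines[:max(limit, 0)]
--     pi = _prefix_function(p)
--     k = 0
--     for line in left_lines:
--         k = _advance(p, pi, k, line)
--     overlap = k
--     return "\n".join(left_lines), "\n".join(right_lines[overlap:])
-- ===== Notes on version B (the rewrite author's own statement) =====
-- stated objective: alternative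
-- what changed: Replaces A's descending loop of slice-equality comparisons (up to limit comparisons, each re-slicing both line lists) by a single KMP pass: the prefix function of the truncated right-hand line list is built once and the left lines are streamed through the automaton, whose final state is exactly the overlap length.
import Mathlib
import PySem

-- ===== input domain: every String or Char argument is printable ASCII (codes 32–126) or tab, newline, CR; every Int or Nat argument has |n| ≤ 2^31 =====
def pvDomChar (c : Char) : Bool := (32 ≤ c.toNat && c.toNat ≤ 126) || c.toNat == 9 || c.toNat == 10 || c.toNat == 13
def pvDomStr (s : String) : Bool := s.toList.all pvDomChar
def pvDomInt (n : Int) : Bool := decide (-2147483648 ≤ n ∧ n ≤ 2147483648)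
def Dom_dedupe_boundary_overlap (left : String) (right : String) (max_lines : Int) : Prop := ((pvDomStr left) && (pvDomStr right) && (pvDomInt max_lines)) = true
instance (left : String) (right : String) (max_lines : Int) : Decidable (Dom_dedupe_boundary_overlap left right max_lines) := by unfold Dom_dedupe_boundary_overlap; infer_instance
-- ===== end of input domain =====

-- ===== PORT A =====
-- B replaces A's descending slice-equality scan by a single KMP automaton pass over the line
-- lists (prefix function of the truncated right-hand line list); same normalize/split/join framing.
def pvNormalize (t : String) : String :=
  PySem.Str.replace (PySem.Str.replace t "\r\n" "\n") "\r" "\n"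

def pvLines (t : String) : List String :=
  (PySem.Str.split? (pvNormalize t) "\n").getD []

-- 'for size in range(limit, 0, -1): if left_lines[-size:] == right_lines[:size]: overlap = size; break'
def pvALoop (L R : List String) : List Int → Int
  | [] => 0
  | s :: rest =>
    if PySem.List.slice L (some (-s)) none = PySem.List.slice R none (some s) then s
    else pvALoop L R rest

def dedupe_boundary_overlap (left : String) (right : String) (max_lines : Int) : String × String :=
  let L := pvLines left
  let R := pvLines right
  let limit : Int := min max_lines (min (L.length : Int) (R.length : Int))
  let overlap : Int := pvALoop L R (PySem.List.pyRange limit 0 (-1))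
  let R' := if overlap > 0 then PySem.List.slice R (some overlap) none else R
  (PySem.Str.join "\n" L, PySem.Str.join "\n" R')

-- ===== PORT B =====
-- 'while k > 0 and (k == len(p) or line != p[k]): k = pi[k-1]'  (fuel-guarded; fuel k suffices
-- for the prefix tables this port builds, since every step strictly decreases k)
def pvAdvWhile (p : List String) (pi : List Nat) (line : String) : Nat → Nat → Nat
  | 0, k => k
  | fuel + 1, k =>
    if k ≠ 0 ∧ (k = p.length ∨ line ≠ p.getD k "") then
      pvAdvWhile p pi line fuel (pi.getD (k - 1) 0)
    else k

-- '_advance(p, pi, k, line)'; 'p[k]' is read as getD — every actual read is in range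
def pvAdvance (p : List String) (pi : List Nat) (k : Nat) (line : String) : Nat :=
  let k' := pvAdvWhile p pi line k k
  if k' < p.length ∧ line = p.getD k' "" then k' + 1 else k'

-- '_prefix_function(p)': pi = [0]*len(p); for i in range(1, len(p)): k = _advance(...); pi[i] = k
def pvPrefixFunction (p : List String) : List Nat :=
  if p.length = 0 then []
  else
    ((List.range (p.length - 1)).foldl
      (fun (st : List Nat × Nat) j =>
        let k := pvAdvance p st.1 st.2 (p.getD (j + 1) "")
        (st.1 ++ [k], k))
      ([0], 0)).1

def dedupe_boundary_overlap_alt (left : String) (right : String) (max_lines : Int) : String × String :=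
  let L := pvLines left
  let R := pvLines right
  let limit : Int := min max_lines (min (L.length : Int) (R.length : Int))
  let p := PySem.List.slice R none (some (max limit 0))
  let pi := pvPrefixFunction p
  let overlap : Nat := L.foldl (fun k line => pvAdvance p pi k line) 0
  (PySem.Str.join "\n" L, PySem.Str.join "\n" (PySem.List.slice R (some (overlap : Int)) none))

-- ===== PRECONDITION & SPEC =====
def Spec_dedupe_boundary_overlap (left : String) (right : String) (max_lines : Int) (out : String × String) : Prop := out = dedupe_boundary_overlap_alt left right max_lines
instance (left : String) (right : String) (max_lines : Int) (out : String × String) : Decidable (Spec_dedupe_boundary_overlap left right max_lines out) := by unfold Spec_dedupe_boundary_overlap; infer_instance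

-- ===== CLAIM (what is proved, stated in full; the proofs are below) =====
def Claim_equal_dedupe_boundary_overlap : Prop := ∀ (left : String) (right : String) (max_lines : Int), Dom_dedupe_boundary_overlap left right max_lines → Spec_dedupe_boundary_overlap left right max_lines (dedupe_boundary_overlap left right max_lines)

-- ===== LEMMAS AND PROOFS =====

-- largest proper border of p.take n
def pvMaxPB (p : List String) (n : Nat) : Nat :=
  Nat.findGreatest (fun s => p.take s <:+ p.take n) (n - 1)

-- the prefix table pi is correct up to bound bnd
def pvPiOk (p : List String) (pi : List Nat) (bnd : Nat) : Prop :=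
  ∀ j, 1 ≤ j → j ≤ bnd → pi.getD (j - 1) 0 = pvMaxPB p j

-- longest s with p.take s a suffix of T
def pvK (p : List String) (T : List String) : Nat :=
  Nat.findGreatest (fun s => p.take s <:+ T) p.length

theorem pv_suffix_of_suffix_length_le {l1 l2 l3 : List String}
    (h1 : l1 <:+ l3) (h2 : l2 <:+ l3) (h : l1.length ≤ l2.length) : l1 <:+ l2 := by
  rw [← List.reverse_prefix] at h1 h2 ⊢
  exact List.prefix_of_prefix_length_le h1 h2 (by simpa)

theorem pv_snoc_suffix_snoc {xs ys : List String} {a b : String} :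
    xs ++ [a] <:+ ys ++ [b] ↔ a = b ∧ xs <:+ ys := by
  rw [← List.reverse_prefix]
  simp [List.cons_prefix_cons, ← List.reverse_prefix]

theorem pv_snoc_suffix_snoc_of {xs ys : List String} {a : String} (h : xs <:+ ys) :
    xs ++ [a] <:+ ys ++ [a] := by
  obtain ⟨u, rfl⟩ := h
  exact ⟨u, by simp⟩

theorem pv_take_snoc {l : List String} {i : Nat} (h : i < l.length) :
    l.take (i + 1) = l.take i ++ [l.getD i ""] := by
  rw [List.take_add_one]
  simp [List.getElem?_eq_getElem h, List.getD_eq_getElem?_getD]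

theorem pv_findGreatest_congr {P Q : Nat → Prop} [DecidablePred P] [DecidablePred Q]
    (n : Nat) (h : ∀ s, s ≤ n → (P s ↔ Q s)) : Nat.findGreatest P n = Nat.findGreatest Q n := by
  induction n with
  | zero => rfl
  | succ n ih =>
    rw [Nat.findGreatest_succ, Nat.findGreatest_succ, if_congr (h (n+1) le_rfl) rfl
      (ih fun s hs => h s (by omega))]

theorem pvMaxPB_le (p : List String) (n : Nat) : pvMaxPB p n ≤ n - 1 := Nat.findGreatest_le _

theorem pvMaxPB_suffix (p : List String) (n : Nat) : p.take (pvMaxPB p n) <:+ p.take n := by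
  have h := Nat.findGreatest_spec (P := fun s => p.take s <:+ p.take n) (n := n - 1) (m := 0)
    (Nat.zero_le _) (by simp)
  exact h

theorem pvK_le (p : List String) (T : List String) : pvK p T ≤ p.length := Nat.findGreatest_le _

theorem pvK_suffix (p : List String) (T : List String) : p.take (pvK p T) <:+ T := by
  have h := Nat.findGreatest_spec (P := fun s => p.take s <:+ T) (n := p.length) (m := 0)
    (Nat.zero_le _) (by simp)
  exact h

theorem pvAdvWhile_succ (p : List String) (pi : List Nat) (line : String) (fuel k : Nat) :
    pvAdvWhile p pi line (fuel + 1) k =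
      if k ≠ 0 ∧ (k = p.length ∨ line ≠ p.getD k "") then
        pvAdvWhile p pi line fuel (pi.getD (k - 1) 0)
      else k := rfl

theorem pvAdvWhile_spec (p : List String) (pi : List Nat) (line : String) (k fuel : Nat)
    (hfuel : k ≤ fuel) (hk : k ≤ p.length) (hpi : pvPiOk p pi k) :
    pvAdvWhile p pi line fuel k ≤ k ∧
    p.take (pvAdvWhile p pi line fuel k) <:+ p.take k ∧
    (pvAdvWhile p pi line fuel k = 0 ∨
      (pvAdvWhile p pi line fuel k < p.length ∧ line = p.getD (pvAdvWhile p pi line fuel k) "")) ∧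
    (∀ m, m ≤ k → p.take m <:+ p.take k → m < p.length → line = p.getD m "" →
      m ≤ pvAdvWhile p pi line fuel k) := by
  induction k using Nat.strong_induction_on generalizing fuel with
  | _ k IH =>
  cases fuel with
  | zero =>
    have hk0 : k = 0 := by omega
    subst hk0
    exact ⟨le_rfl, by simp [pvAdvWhile], Or.inl rfl, fun m hm _ _ _ => hm⟩
  | succ fuel =>
    rw [pvAdvWhile_succ]
    by_cases hc : k ≠ 0 ∧ (k = p.length ∨ line ≠ p.getD k "")
    · rw [if_pos hc]
      have hpik : pi.getD (k - 1) 0 = pvMaxPB p k := hpi k (by omega) le_rfl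
      have hk'le : pi.getD (k - 1) 0 ≤ k - 1 := by rw [hpik]; exact pvMaxPB_le p k
      have hk'suf : p.take (pi.getD (k - 1) 0) <:+ p.take k := by
        rw [hpik]; exact pvMaxPB_suffix p k
      obtain ⟨r1, r2, r3, r4⟩ := IH (pi.getD (k - 1) 0) (by omega) fuel (by omega) (by omega)
        (fun j h1 h2 => hpi j h1 (by omega))
      refine ⟨by omega, r2.trans hk'suf, r3, ?_⟩
      intro m hm hmsuf hmlen hmline
      have hmk : m < k := by
        rcases Nat.lt_or_ge m k with h | h
        · exact h
        · exfalso
          have : m = k := by omega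
          subst this
          rcases hc.2 with h' | h'
          · omega
          · exact h' hmline
      have hm' : m ≤ pi.getD (k - 1) 0 := by
        rw [hpik]
        exact Nat.le_findGreatest (P := fun s => p.take s <:+ p.take k) (by omega) hmsuf
      have hms : p.take m <:+ p.take (pi.getD (k - 1) 0) := by
        apply pv_suffix_of_suffix_length_le hmsuf hk'suf
        simp only [List.length_take]
        omega
      exact r4 m hm' hms hmlen hmline
    · rw [if_neg hc]
      rw [not_and_or, not_or, not_not, not_ne_iff] at hc
      refine ⟨le_rfl, List.suffix_rfl, ?_, fun m hm _ _ _ => hm⟩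
      rcases hc with hc | ⟨h1, h2⟩
      · exact Or.inl (by omega)
      · exact Or.inr ⟨by omega, h2⟩

theorem pvAdvance_spec (p : List String) (pi : List Nat) (T : List String) (line : String)
    (k : Nat) (hk : k ≤ p.length) (hsuf : p.take k <:+ T) (hpi : pvPiOk p pi k) :
    pvAdvance p pi k line ≤ k + 1 ∧
    pvAdvance p pi k line ≤ p.length ∧
    p.take (pvAdvance p pi k line) <:+ T ++ [line] ∧
    (∀ s, 1 ≤ s → s ≤ k + 1 → s ≤ p.length → p.take s <:+ T ++ [line] →
      s ≤ pvAdvance p pi k line) := by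
  unfold pvAdvance
  obtain ⟨w1, w2, w3, w4⟩ := pvAdvWhile_spec p pi line k k le_rfl hk hpi
  set w := pvAdvWhile p pi line k k with hw
  have hwT : p.take w <:+ T := w2.trans hsuf
  by_cases hc : w < p.length ∧ line = p.getD w ""
  · rw [if_pos hc]
    refine ⟨by omega, by omega, ?_, ?_⟩
    · rw [pv_take_snoc hc.1, ← hc.2]
      exact pv_snoc_suffix_snoc_of hwT
    · intro s hs1 hs2 hs3 hssuf
      have hs1' : s - 1 < p.length := by omega
      have hdec : p.take s = p.take (s - 1) ++ [p.getD (s - 1) ""] := by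
        have h := pv_take_snoc (l := p) (i := s - 1) hs1'
        rwa [Nat.sub_add_cancel hs1] at h
      rw [hdec, pv_snoc_suffix_snoc] at hssuf
      obtain ⟨hline, hsufT⟩ := hssuf
      have hmk : p.take (s - 1) <:+ p.take k := by
        apply pv_suffix_of_suffix_length_le hsufT hsuf
        simp only [List.length_take]
        omega
      have := w4 (s - 1) (by omega) hmk hs1' hline.symm
      omega
  · rw [if_neg hc]
    have hw0 : w = 0 := by
      rcases w3 with h | h
      · exact h
      · exact absurd h hc
    refine ⟨by omega, by omega, by simp [hw0], ?_⟩
    intro s hs1 hs2 hs3 hssuf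
    exfalso
    have hs1' : s - 1 < p.length := by omega
    have hdec : p.take s = p.take (s - 1) ++ [p.getD (s - 1) ""] := by
      have h := pv_take_snoc (l := p) (i := s - 1) hs1'
      rwa [Nat.sub_add_cancel hs1] at h
    rw [hdec, pv_snoc_suffix_snoc] at hssuf
    obtain ⟨hline, hsufT⟩ := hssuf
    have hmk : p.take (s - 1) <:+ p.take k := by
      apply pv_suffix_of_suffix_length_le hsufT hsuf
      simp only [List.length_take]
      omega
    have hle := w4 (s - 1) (by omega) hmk hs1' hline.symm
    have hs10 : s - 1 = 0 := by omega
    rw [hs10] at hline hs1'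
    exact hc (by rw [hw0]; exact ⟨hs1', hline.symm⟩)

theorem pv_getD_snoc_lt (l : List Nat) (x : Nat) (i : Nat) (h : i < l.length) :
    (l ++ [x]).getD i 0 = l.getD i 0 := by
  simp [List.getD_eq_getElem?_getD, List.getElem?_append_left h]

theorem pv_getD_snoc_eq (l : List Nat) (x : Nat) :
    (l ++ [x]).getD l.length 0 = x := by
  simp [List.getD_eq_getElem?_getD]

theorem pvPF_inv (p : List String) (c : Nat) (hc : c ≤ p.length - 1) :
    (((List.range c).foldl (fun (st : List Nat × Nat) j =>
        let k := pvAdvance p st.1 st.2 (p.getD (j + 1) "")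
        (st.1 ++ [k], k)) ([0], 0)).1.length = c + 1) ∧
    (pvPiOk p ((List.range c).foldl (fun (st : List Nat × Nat) j =>
        let k := pvAdvance p st.1 st.2 (p.getD (j + 1) "")
        (st.1 ++ [k], k)) ([0], 0)).1 (c + 1)) ∧
    (((List.range c).foldl (fun (st : List Nat × Nat) j =>
        let k := pvAdvance p st.1 st.2 (p.getD (j + 1) "")
        (st.1 ++ [k], k)) ([0], 0)).2 = pvMaxPB p (c + 1)) := by
  induction c with
  | zero =>
    refine ⟨rfl, ?_, rfl⟩
    intro j h1 h2
    have hj : j = 1 := by omega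
    subst hj
    rfl
  | succ c ih =>
    obtain ⟨il, ipi, ik⟩ := ih (by omega)
    rw [List.range_succ, List.foldl_append, List.foldl_cons, List.foldl_nil]
    set st := ((List.range c).foldl (fun (st : List Nat × Nat) j =>
        let k := pvAdvance p st.1 st.2 (p.getD (j + 1) "")
        (st.1 ++ [k], k)) ([0], 0)) with hst
    simp only []
    rw [ik]
    have hc1 : c + 1 < p.length := by omega
    have hkle : pvMaxPB p (c + 1) ≤ p.length := by have := pvMaxPB_le p (c + 1); omega
    have hksuf : p.take (pvMaxPB p (c + 1)) <:+ p.take (c + 1) := pvMaxPB_suffix p (c + 1)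
    have hpiK : pvPiOk p st.1 (pvMaxPB p (c + 1)) := by
      intro j h1 h2
      apply ipi j h1
      have := pvMaxPB_le p (c + 1)
      omega
    obtain ⟨a1, a2, a3, a4⟩ := pvAdvance_spec p st.1 (p.take (c + 1)) (p.getD (c + 1) "")
      (pvMaxPB p (c + 1)) hkle hksuf hpiK
    rw [← pv_take_snoc hc1] at a3 a4
    have hval : pvAdvance p st.1 (pvMaxPB p (c + 1)) (p.getD (c + 1) "") = pvMaxPB p (c + 2) := by
      apply le_antisymm
      · by_cases h0 : pvAdvance p st.1 (pvMaxPB p (c + 1)) (p.getD (c + 1) "") = 0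
        · rw [h0]; exact Nat.zero_le _
        · exact Nat.le_findGreatest (P := fun s => p.take s <:+ p.take (c + 2))
            (by have := pvMaxPB_le p (c + 1); omega) a3
      · set s := pvMaxPB p (c + 2) with hs
        by_cases hs0 : s = 0
        · omega
        · have hsle : s ≤ c + 1 := by have := pvMaxPB_le p (c + 2); omega
          have hssuf : p.take s <:+ p.take (c + 2) := pvMaxPB_suffix p (c + 2)
          apply a4 s (by omega) ?_ (by omega) hssuf
          -- s ≤ st.2 + 1
          have hs1' : s - 1 < p.length := by omega
          have hdec : p.take s = p.take (s - 1) ++ [p.getD (s - 1) ""] := by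
            have h := pv_take_snoc (l := p) (i := s - 1) hs1'
            rwa [Nat.sub_add_cancel (by omega)] at h
          have hssuf' := hssuf
          rw [hdec, pv_take_snoc hc1, pv_snoc_suffix_snoc] at hssuf'
          obtain ⟨hline, hsufT⟩ := hssuf'
          have : s - 1 ≤ pvMaxPB p (c + 1) :=
            Nat.le_findGreatest (P := fun t => p.take t <:+ p.take (c + 1)) (by omega) hsufT
          omega
    refine ⟨by simp [il], ?_, hval⟩
    intro j h1 h2
    by_cases hj : j ≤ c + 1
    · rw [pv_getD_snoc_lt _ _ _ (by omega)]
      exact ipi j h1 hj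
    · have hj2 : j = c + 2 := by omega
      subst hj2
      have : (c + 2) - 1 = st.1.length := by omega
      rw [this, pv_getD_snoc_eq]
      exact hval

theorem pvPrefixFunction_spec (p : List String) :
    pvPiOk p (pvPrefixFunction p) p.length := by
  unfold pvPrefixFunction
  by_cases hp : p.length = 0
  · rw [if_pos hp]
    intro j h1 h2
    omega
  · rw [if_neg hp]
    obtain ⟨_, hpi, _⟩ := pvPF_inv p (p.length - 1) le_rfl
    have : p.length - 1 + 1 = p.length := by omega
    rwa [this] at hpi

theorem pvStream_spec (p : List String) (pi : List Nat) (hpi : pvPiOk p pi p.length)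
    (L : List String) :
    L.foldl (fun k line => pvAdvance p pi k line) 0 = pvK p L := by
  induction L using List.reverseRecOn with
  | nil =>
    rw [List.foldl_nil]
    symm
    rw [pvK, Nat.findGreatest_eq_zero_iff]
    intro m hm hmn hP
    have hlen : (p.take m).length = m := by simp [List.length_take]; omega
    rw [List.suffix_nil] at hP
    rw [hP] at hlen
    simp at hlen
    omega
  | append_singleton T c ih =>
    rw [List.foldl_append, List.foldl_cons, List.foldl_nil, ih]
    obtain ⟨a1, a2, a3, a4⟩ := pvAdvance_spec p pi T c (pvK p T) (pvK_le p T) (pvK_suffix p T)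
      (fun j h1 h2 => hpi j h1 (le_trans h2 (pvK_le p T)))
    apply le_antisymm
    · by_cases h0 : pvAdvance p pi (pvK p T) c = 0
      · rw [h0]; exact Nat.zero_le _
      · exact Nat.le_findGreatest (P := fun s => p.take s <:+ T ++ [c]) a2 a3
    · set s := pvK p (T ++ [c]) with hs
      by_cases hs0 : s = 0
      · omega
      · have hsle : s ≤ p.length := pvK_le _ _
        have hssuf : p.take s <:+ T ++ [c] := pvK_suffix _ _
        apply a4 s (by omega) ?_ hsle hssuf
        have hs1' : s - 1 < p.length := by omega
        have hdec : p.take s = p.take (s - 1) ++ [p.getD (s - 1) ""] := by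
          have h := pv_take_snoc (l := p) (i := s - 1) hs1'
          rwa [Nat.sub_add_cancel (by omega)] at h
        have hssuf' := hssuf
        rw [hdec, pv_snoc_suffix_snoc] at hssuf'
        obtain ⟨hline, hsufT⟩ := hssuf'
        have : s - 1 ≤ pvK p T :=
          Nat.le_findGreatest (P := fun t => p.take t <:+ T) (by omega) hsufT
        omega

theorem pvALoop_spec (L R : List String) (lim : Nat) :
    pvALoop L R (PySem.List.pyRange (lim : Int) 0 (-1)) =
      ((Nat.findGreatest (fun s => L.drop (L.length - s) = R.take s) lim : Nat) : Int) := by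
  induction lim with
  | zero =>
    rw [PySem.List.pyRange_neg_one_eq_nil (by omega)]
    rfl
  | succ lim ih =>
    have hcast : ((lim + 1 : Nat) : Int) = ((lim : Nat) : Int) + 1 := by push_cast; ring
    rw [hcast,
      PySem.List.pyRange_neg_one_cons (by omega),
      show ((lim : Nat) : Int) + 1 - 1 = ((lim : Nat) : Int) by ring]
    show (if PySem.List.slice L (some (-(((lim : Nat) : Int) + 1))) none =
        PySem.List.slice R none (some (((lim : Nat) : Int) + 1)) then ((lim : Nat) : Int) + 1
      else pvALoop L R (PySem.List.pyRange ((lim : Nat) : Int) 0 (-1))) = _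
    have h1 : -(((lim : Nat) : Int) + 1) = -(((lim + 1 : Nat) : Int)) := by push_cast; ring
    rw [h1, PySem.List.slice_from_neg_natCast L (lim + 1) (by omega),
      PySem.List.slice_to R (b := ((lim : Nat) : Int) + 1) (by omega)]
    have h2 : (((lim : Nat) : Int) + 1).toNat = lim + 1 := by omega
    rw [h2, Nat.findGreatest_succ]
    by_cases hP : L.drop (L.length - (lim + 1)) = R.take (lim + 1)
    · rw [if_pos hP, if_pos hP]
      push_cast
      ring
    · rw [if_neg hP, if_neg hP, ih]

theorem pv_core (L R : List String) (max_lines : Int) :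
    (PySem.Str.join "\n" L,
      PySem.Str.join "\n"
        (if pvALoop L R (PySem.List.pyRange (min max_lines (min (L.length : Int) (R.length : Int))) 0 (-1)) > 0
         then PySem.List.slice R
            (some (pvALoop L R (PySem.List.pyRange (min max_lines (min (L.length : Int) (R.length : Int))) 0 (-1)))) none
         else R)) =
    (PySem.Str.join "\n" L,
      PySem.Str.join "\n" (PySem.List.slice R
        (some ((L.foldl (fun k line =>
            pvAdvance (PySem.List.slice R none (some (max (min max_lines (min (L.length : Int) (R.length : Int))) 0)))
              (pvPrefixFunction (PySem.List.slice R none (some (max (min max_lines (min (L.length : Int) (R.length : Int))) 0))))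
              k line) 0 : Nat) : Int)) none)) := by
  set limit := min max_lines (min (L.length : Int) (R.length : Int)) with hlim
  have hlimL : limit ≤ (L.length : Int) := le_trans (min_le_right _ _) (min_le_left _ _)
  have hlimR : limit ≤ (R.length : Int) := le_trans (min_le_right _ _) (min_le_right _ _)
  set p := PySem.List.slice R none (some (max limit 0)) with hp
  have hpi := pvPrefixFunction_spec p
  have hstream := pvStream_spec p (pvPrefixFunction p) hpi L
  by_cases hneg : limit ≤ 0
  · -- limit ≤ 0: no dedupe on either side
    have hA : pvALoop L R (PySem.List.pyRange limit 0 (-1)) = 0 := by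
      rw [PySem.List.pyRange_neg_one_eq_nil hneg]
      rfl
    have hpnil : p = [] := by
      rw [hp, show max limit 0 = (0 : Int) by omega, PySem.List.slice_to R (by omega)]
      simp
    have hB : L.foldl (fun k line => pvAdvance p (pvPrefixFunction p) k line) 0 = 0 := by
      rw [hstream, pvK, hpnil]
      rfl
    rw [hA, hB]
    rw [if_neg (by omega), PySem.List.slice_from R (by omega)]
    simp
  · -- 0 < limit
    set t := limit.toNat with ht
    have htpos : 1 ≤ t := by omega
    have htL : t ≤ L.length := by omega
    have htR : t ≤ R.length := by omega
    have hcast : ((t : Nat) : Int) = limit := by omega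
    have hptake : p = R.take t := by
      rw [hp, show max limit 0 = limit by omega, PySem.List.slice_to R (by omega)]
    have hplen : p.length = t := by
      rw [hptake]
      simp [List.length_take]
      omega
    have hcongr : Nat.findGreatest (fun s => L.drop (L.length - s) = R.take s) t =
        Nat.findGreatest (fun s => p.take s <:+ L) t := by
      apply pv_findGreatest_congr
      intro s hs
      have h1 : p.take s = R.take s := by
        rw [hptake, List.take_take, min_eq_left hs]
      have h2 : (R.take s).length = s := by
        simp [List.length_take]
        omega
      rw [List.suffix_iff_eq_drop, h1, h2]
      exact ⟨fun h => h.symm, fun h => h.symm⟩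
    have hA : pvALoop L R (PySem.List.pyRange limit 0 (-1)) =
        ((L.foldl (fun k line => pvAdvance p (pvPrefixFunction p) k line) 0 : Nat) : Int) := by
      rw [← hcast, pvALoop_spec L R t, hstream, pvK, hplen, hcongr]
    rw [hA]
    set o : Nat := L.foldl (fun k line => pvAdvance p (pvPrefixFunction p) k line) 0 with ho
    by_cases ho0 : 0 < o
    · rw [if_pos (by omega)]
    · rw [if_neg (by omega), PySem.List.slice_from R (by omega)]
      have : o = 0 := by omega
      rw [this]
      simp

-- ===== VERDICT (by name: the statement is the Claim_ definition above) =====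
theorem dedupe_boundary_overlap_spec : Claim_equal_dedupe_boundary_overlap := by
  intro left right max_lines _
  exact pv_core (pvLines left) (pvLines right) max_lines
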